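-- pv_equiv track=rewrite | github.com/Overton77/biotech-research-ingestion | src/research/compiler/mission_creator.py | _invert_dependency_map
-- ===== SOURCE A (Python) =====
-- def _invert_dependency_map(dep_map: dict[str, list[str]]) -> dict[str, list[str]]:
--     reverse: dict[str, list[str]] = {k: [] for k in dep_map}
--     for task_id, deps in dep_map.items():
--         for d in deps:
--             if d not in reverse:
--                 reverse[d] = []
--             reverse[d].append(task_id)
--     return reverse
-- ===== SOURCE B (Python) =====
-- def _invert_dependency_map(dep_map: dict[str, list[str]]) -> dict[str, list[str]]:
--     # Build the output key ordering first: the map's keys, then every new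
--     # dependency target in first-encounter order.
--     nodes = list(dep_map)
--     for deps in dep_map.values():
--         for d in deps:
--             if d not in nodes:
--                 nodes.append(d)
--     # Gather each node's predecessors with a full per-node scan (per occurrence).
--     return {
--         n: [task_id for task_id, deps in dep_map.items() for d in deps if d == n]
--         for n in nodes
--     }
-- ===== Notes on version B (the rewrite author's own statement) =====
-- stated objective: alternative
-- what changed: Instead of accumulating the reverse map in one edge pass, B first computes the output key ordering explicitly (keys, then new targets in first-encounter order) and then builds each node's predecessor list by a separate full scan over all dependency lists.
import Mathlib
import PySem

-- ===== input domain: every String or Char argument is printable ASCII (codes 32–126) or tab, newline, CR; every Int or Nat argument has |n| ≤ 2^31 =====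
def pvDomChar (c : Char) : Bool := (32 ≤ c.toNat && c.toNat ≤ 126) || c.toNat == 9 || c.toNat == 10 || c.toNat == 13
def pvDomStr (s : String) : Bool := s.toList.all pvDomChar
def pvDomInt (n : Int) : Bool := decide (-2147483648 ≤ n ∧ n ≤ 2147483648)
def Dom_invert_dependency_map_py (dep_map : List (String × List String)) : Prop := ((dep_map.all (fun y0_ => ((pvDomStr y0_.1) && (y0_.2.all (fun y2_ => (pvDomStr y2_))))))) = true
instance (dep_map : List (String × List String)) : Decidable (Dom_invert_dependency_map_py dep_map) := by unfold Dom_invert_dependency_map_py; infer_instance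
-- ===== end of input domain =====

-- B builds the output key ordering first, then gathers each node's predecessors by a separate
-- per-node scan over all dependency lists (alternative decomposition; not claimed faster).


-- ===== PORT A =====
def invert_dependency_map_py (dep_map : List (String × List String)) : List (String × List String) :=
  -- reverse = {k: [] for k in dep_map}
  let reverse : PySem.Dict String (List String) :=
    dep_map.foldl (fun r kv => r.insert kv.1 []) PySem.Dict.empty
  -- for task_id, deps in dep_map.items(): for d in deps: …
  let reverse :=
    dep_map.foldl (fun r kv =>
      kv.2.foldl (fun r d =>
        -- if d not in reverse: reverse[d] = []
        let r := if r.contains d then r else r.insert d ([] : List String)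
        -- reverse[d].append(task_id)
        r.modify d [] (fun l => l ++ [kv.1])) r) reverse
  reverse.items

-- ===== PORT B =====
def invert_dependency_map_py_alt (dep_map : List (String × List String)) : List (String × List String) :=
  -- nodes = list(dep_map); for deps in dep_map.values(): for d in deps: if d not in nodes: nodes.append(d)
  let nodes : List String :=
    dep_map.foldl (fun ns kv =>
      kv.2.foldl (fun ns d => PySem.Set.add ns d) ns)
      (dep_map.map Prod.fst)
  -- {n: [task_id for task_id, deps in dep_map.items() for d in deps if d == n] for n in nodes}
  nodes.map (fun n =>
    (n, dep_map.flatMap (fun kv => (kv.2.filter (fun d => d == n)).map (fun _ => kv.1))))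

-- ===== PRECONDITION & SPEC =====
-- Pre_ excludes association lists with duplicate keys: a Python dict cannot contain them, so they
-- represent no input A is ever given (the dict constructor collapses duplicates before A runs).
def Pre_invert_dependency_map_py (dep_map : List (String × List String)) : Prop :=
  (dep_map.map Prod.fst).Nodup
instance (dep_map : List (String × List String)) : Decidable (Pre_invert_dependency_map_py dep_map) := by unfold Pre_invert_dependency_map_py; infer_instance

def pvWitness_invert_dependency_map_py : (List (String × List String)) :=
  [("a", ["b", "c"]), ("b", ["c"])]

def Spec_invert_dependency_map_py (dep_map : List (String × List String)) (out : List (String × List String)) : Prop := out = invert_dependency_map_py_alt dep_map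
instance (dep_map : List (String × List String)) (out : List (String × List String)) : Decidable (Spec_invert_dependency_map_py dep_map out) := by unfold Spec_invert_dependency_map_py; infer_instance

-- ===== CLAIM (what is proved, stated in full; the proofs are below) =====
def Claim_equal_invert_dependency_map_py : Prop := ∀ (dep_map : List (String × List String)), Dom_invert_dependency_map_py dep_map → Pre_invert_dependency_map_py dep_map → Spec_invert_dependency_map_py dep_map (invert_dependency_map_py dep_map)

-- ===== LEMMAS AND PROOFS =====

-- A's "ensure key exists, then append" step is exactly one Dict.modify.
theorem ensure_modify_eq_modify (r : PySem.Dict String (List String)) (d t : String) :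
    (if r.contains d then r else r.insert d ([] : List String)).modify d []
        (fun l => l ++ [t])
      = r.modify d [] (fun l => l ++ [t]) := by
  by_cases h : r.contains d
  · simp [h]
  · rw [if_neg (by simp [h]), PySem.Dict.modify, PySem.Dict.modify,
      PySem.Dict.getD_insert_self, PySem.Dict.insert_insert_self,
      PySem.Dict.getD_of_not_contains _ _ (by simp [h])]

-- A's double edge loop is a single fold over the flattened (dep, task) edge list.
theorem a_loop_eq_edges (dep_map : List (String × List String))
    (r : PySem.Dict String (List String)) :
    dep_map.foldl (fun r kv =>
        kv.2.foldl (fun r d =>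
          (if r.contains d then r else r.insert d ([] : List String)).modify d []
            (fun l => l ++ [kv.1])) r) r
      = (dep_map.flatMap (fun kv => kv.2.map (fun d => (d, kv.1)))).foldl
          (fun r p => r.modify p.1 [] (fun l => l ++ [p.2])) r := by
  induction dep_map generalizing r with
  | nil => rfl
  | cons kv rest ih =>
      rw [List.foldl_cons, ih, List.flatMap_cons, List.foldl_append]
      simp only [List.foldl_map, ensure_modify_eq_modify]

-- Every value of A's initial dict is [].
theorem getD_init (dep_map : List (String × List String)) (c : String) :
    (dep_map.foldl (fun r kv => r.insert kv.1 ([] : List String)) PySem.Dict.empty).getD c []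
      = [] := by
  suffices h : ∀ (r : PySem.Dict String (List String)), (∀ x, r.getD x [] = []) →
      (dep_map.foldl (fun r kv => r.insert kv.1 ([] : List String)) r).getD c [] = [] by
    exact h _ (fun x => PySem.Dict.getD_empty x [])
  induction dep_map with
  | nil => intro r hr; simpa using hr c
  | cons kv rest ih =>
      intro r hr
      exact ih _ (fun x => by rw [PySem.Dict.getD_insert]; split <;> simp [hr])

-- Keys of A's initial dict, under the no-duplicate-keys precondition.
theorem keys_init (dep_map : List (String × List String))
    (h : (dep_map.map Prod.fst).Nodup) :
    (dep_map.foldl (fun r kv => r.insert kv.1 ([] : List String)) PySem.Dict.empty).keys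
      = dep_map.map Prod.fst := by
  rw [PySem.Dict.keys_foldl_insert_key]
  simp only [PySem.Dict.keys_empty, PySem.Set.update_nil_left]
  exact PySem.Set.ofList_eq_self_of_nodup _ h

-- B's node-ordering loop is one Set.update by the flattened dependency lists.
theorem nodes_eq_update (dep_map : List (String × List String)) (s : List String) :
    dep_map.foldl (fun ns kv => kv.2.foldl (fun ns d => PySem.Set.add ns d) ns) s
      = PySem.Set.update s (dep_map.flatMap (fun kv => kv.2)) := by
  induction dep_map generalizing s with
  | nil => simp [PySem.Set.update]
  | cons kv rest ih =>
      simp only [List.foldl_cons, List.flatMap_cons, ih, PySem.Set.update_append]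
      rfl

theorem invert_eq_alt (dep_map : List (String × List String))
    (hnd : (dep_map.map Prod.fst).Nodup) :
    invert_dependency_map_py dep_map = invert_dependency_map_py_alt dep_map := by
  simp only [invert_dependency_map_py, invert_dependency_map_py_alt]
  rw [a_loop_eq_edges, nodes_eq_update]
  set edges := dep_map.flatMap (fun kv => kv.2.map (fun d => (d, kv.1))) with hedges
  set r0 := dep_map.foldl (fun r kv => r.insert kv.1 ([] : List String)) PySem.Dict.empty with hr0
  have hkeys0 : r0.keys = dep_map.map Prod.fst := keys_init dep_map hnd
  have hkeys : (edges.foldl (fun r p => r.modify p.1 [] (fun l => l ++ [p.2])) r0).keys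
      = PySem.Set.update (dep_map.map Prod.fst) (dep_map.flatMap (fun kv => kv.2)) := by
    rw [PySem.Dict.keys_foldl_modify_key edges Prod.fst [] (fun _ p => (fun l => l ++ [p.2])) r0,
      hkeys0]
    congr 1
    simp [hedges, List.map_flatMap, Function.comp_def]
  have hnodup : (edges.foldl (fun r p => r.modify p.1 [] (fun l => l ++ [p.2])) r0).keys.Nodup :=
    PySem.Dict.nodup_keys_foldl_modify_key edges Prod.fst [] (fun _ p => (fun l => l ++ [p.2])) r0
      (by rw [hkeys0]; exact hnd)
  rw [PySem.Dict.items_eq_map_keys _ hnodup [], hkeys]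
  apply List.map_congr_left
  intro n _
  rw [PySem.Dict.getD_foldl_modify_append, getD_init]
  simp [hedges, List.map_flatMap, List.filter_flatMap, List.filter_map, Function.comp_def]

-- ===== VERDICT (by name: the statement is the Claim_ definition above) =====
theorem invert_dependency_map_py_spec : Claim_equal_invert_dependency_map_py := by
  intro dep_map _ hpre
  unfold Spec_invert_dependency_map_py
  exact invert_eq_alt dep_map hpre
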